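-- pv_equiv track=rewrite | github.com/ChenghengLi/gibbons | src/utils.py | compute_colored_endangered_energy_python
-- ===== SOURCE A (Python) =====
-- from typing import Dict, Tuple, List, Optional, Callable
--
-- def check_attack_python(q1: Tuple[int, int, int], q2: Tuple[int, int, int]) -> bool:
--     """
--     Check if two queens attack each other (pure Python for testing).
--
--     Args:
--         q1: First queen position (i, j, k)
--         q2: Second queen position (i, j, k)
--
--     Returns:
--         Boolean indicating if queens attack each other.
--     """
--     i1, j1, k1 = q1
--     i2, j2, k2 = q2
--
--     di = abs(i1 - i2)
--     dj = abs(j1 - j2)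
--     dk = abs(k1 - k2)
--
--     # Rook-type
--     if (i1 == i2 and j1 == j2) or (i1 == i2 and k1 == k2) or (j1 == j2 and k1 == k2):
--         return True
--
--     # Planar diagonals
--     if k1 == k2 and di == dj and di != 0:
--         return True
--     if j1 == j2 and di == dk and di != 0:
--         return True
--     if i1 == i2 and dj == dk and dj != 0:
--         return True
--
--     # Space diagonal
--     if di == dj == dk and di != 0:
--         return True
--
--     return False
--
-- def compute_colored_endangered_energy_python(queens: List[Tuple[int, int, int]]) -> Tuple[int, int, int]:
--     """
--     Compute colored endangered energy using Python (for verification).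
--
--     Args:
--         queens: List of queen positions as (i, j, k) tuples.
--
--     Returns:
--         Tuple of (total_energy, endangered_count, black_count)
--     """
--     # Count endangered queens
--     n = len(queens)
--     endangered_set = set()
--     for i in range(n):
--         for j in range(i + 1, n):
--             if check_attack_python(queens[i], queens[j]):
--                 endangered_set.add(i)
--                 endangered_set.add(j)
--     endangered_count = len(endangered_set)
--
--     black_count = sum(1 for q in queens if (q[0] + q[1] + q[2]) % 2 == 1)
--     total = endangered_count + 4 * black_count
--     return total, endangered_count, black_count
-- ===== SOURCE B (Python) =====
-- from typing import Tuple, List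
--
--
-- def _keys(i: int, j: int, k: int) -> List[Tuple[int, int, int]]:
--     # Each attack line through (i, j, k) is identified by an invariant key;
--     # two queens attack each other iff they share at least one key.
--     return [
--         (0, i, j), (1, i, k), (2, j, k),                  # rook lines
--         (3, k, i + j), (4, k, i - j),                     # diagonals in the k-plane
--         (5, j, i + k), (6, j, i - k),                     # diagonals in the j-plane
--         (7, i, j + k), (8, i, j - k),                     # diagonals in the i-plane
--         (9, j - i, k - i), (10, j - i, k + i),            # space diagonals
--         (11, j + i, k - i), (12, j + i, k + i),
--     ]
--
--
-- def compute_colored_endangered_energy_python(queens: List[Tuple[int, int, int]]) -> Tuple[int, int, int]: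
--     counts = {}
--     for (i, j, k) in queens:
--         for key in _keys(i, j, k):
--             counts[key] = counts.get(key, 0) + 1
--     endangered_count = 0
--     black_count = 0
--     for (i, j, k) in queens:
--         if any(counts.get(key, 0) >= 2 for key in _keys(i, j, k)):
--             endangered_count += 1
--         if (i + j + k) % 2 == 1:
--             black_count += 1
--     return endangered_count + 4 * black_count, endangered_count, black_count
-- ===== Notes on version B (the rewrite author's own statement) =====
-- stated objective: faster
-- what changed: A tests every pair of queens with check_attack (O(n^2)); B instead assigns each queen 13 attack-line invariant keys (rook lines, planar diagonals, space diagonals), counts key occurrences in one dictionary pass, and marks a queen endangered iff one of its keys occurs at least twice, folding the black-count into the same second pass.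
import Mathlib
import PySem

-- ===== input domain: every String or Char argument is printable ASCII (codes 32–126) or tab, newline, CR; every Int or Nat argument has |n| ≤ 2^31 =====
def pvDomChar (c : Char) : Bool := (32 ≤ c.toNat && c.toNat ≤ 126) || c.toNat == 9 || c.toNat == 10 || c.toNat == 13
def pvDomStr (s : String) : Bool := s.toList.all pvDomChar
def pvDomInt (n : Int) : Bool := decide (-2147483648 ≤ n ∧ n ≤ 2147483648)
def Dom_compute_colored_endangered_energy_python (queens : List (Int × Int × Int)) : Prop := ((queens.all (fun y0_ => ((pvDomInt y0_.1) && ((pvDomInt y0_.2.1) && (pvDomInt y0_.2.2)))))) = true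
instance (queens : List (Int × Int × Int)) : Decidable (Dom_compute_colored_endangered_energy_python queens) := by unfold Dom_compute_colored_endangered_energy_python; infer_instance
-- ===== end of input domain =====

-- B replaces A's O(n^2) pairwise attack test by O(n) bucket counting on the 13
-- attack-line invariant keys of each queen (objective: faster, asymptotic).

-- ===== PORT A =====
def check_attack_python (q1 q2 : Int × Int × Int) : Bool :=
  let i1 := q1.1; let j1 := q1.2.1; let k1 := q1.2.2
  let i2 := q2.1; let j2 := q2.2.1; let k2 := q2.2.2
  let di : Int := ((i1 - i2).natAbs : Int)   -- abs(i1 - i2)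
  let dj : Int := ((j1 - j2).natAbs : Int)
  let dk : Int := ((k1 - k2).natAbs : Int)
  if (i1 == i2 && j1 == j2) || (i1 == i2 && k1 == k2) || (j1 == j2 && k1 == k2) then true
  else if k1 == k2 && di == dj && di != 0 then true
  else if j1 == j2 && di == dk && di != 0 then true
  else if i1 == i2 && dj == dk && dj != 0 then true
  else if di == dj && dj == dk && di != 0 then true   -- di == dj == dk (chained)
  else false

-- the two nested index loops building endangered_set
def pvInnerLoop (queens : List (Int × Int × Int)) (n i : Int) (es : PySem.Set Int) : PySem.Set Int :=
  (PySem.List.pyRange (i + 1) n 1).foldl (fun es j =>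
    if check_attack_python (PySem.List.pyGetD queens i (0, 0, 0)) (PySem.List.pyGetD queens j (0, 0, 0))
    then PySem.Set.add (PySem.Set.add es i) j else es) es

def pvEndangeredSet (queens : List (Int × Int × Int)) (n : Int) : PySem.Set Int :=
  (PySem.List.pyRange 0 n 1).foldl (fun es i => pvInnerLoop queens n i es) PySem.Set.empty

-- sum(1 for q in queens if (q[0]+q[1]+q[2]) % 2 == 1)
def pvBlackCount (queens : List (Int × Int × Int)) : Int :=
  queens.foldl (fun acc q =>
    if PySem.Int.mod (q.1 + q.2.1 + q.2.2) 2 == 1 then acc + 1 else acc) 0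

def compute_colored_endangered_energy_python (queens : List (Int × Int × Int)) : Int × Int × Int :=
  (PySem.Set.len (pvEndangeredSet queens (PySem.List.len queens)) + 4 * pvBlackCount queens,
   PySem.Set.len (pvEndangeredSet queens (PySem.List.len queens)),
   pvBlackCount queens)

-- ===== PORT B =====
-- _keys(i, j, k): the 13 attack-line invariant keys through (i, j, k)
def pvKeys (q : Int × Int × Int) : List (Nat × Int × Int) :=
  let i := q.1; let j := q.2.1; let k := q.2.2
  [(0, i, j), (1, i, k), (2, j, k),
   (3, k, i + j), (4, k, i - j),
   (5, j, i + k), (6, j, i - k),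
   (7, i, j + k), (8, i, j - k),
   (9, j - i, k - i), (10, j - i, k + i),
   (11, j + i, k - i), (12, j + i, k + i)]

-- the first loop of B: build the bucket-count dictionary
def pvCounts (queens : List (Int × Int × Int)) : PySem.Dict (Nat × Int × Int) Int :=
  queens.foldl (fun d q => (pvKeys q).foldl (fun d key => d.insert key (d.getD key 0 + 1)) d)
    PySem.Dict.empty

-- the second loop of B: accumulate (endangered_count, black_count)
def pvEB (queens : List (Int × Int × Int)) : Int × Int :=
  queens.foldl (fun p q =>
    ((if (pvKeys q).any (fun key => decide ((pvCounts queens).getD key 0 ≥ 2)) then p.1 + 1 else p.1),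
     (if PySem.Int.mod (q.1 + q.2.1 + q.2.2) 2 == 1 then p.2 + 1 else p.2))) (0, 0)

def compute_colored_endangered_energy_python_alt (queens : List (Int × Int × Int)) : Int × Int × Int :=
  ((pvEB queens).1 + 4 * (pvEB queens).2, (pvEB queens).1, (pvEB queens).2)

-- ===== PRECONDITION & SPEC =====
def Spec_compute_colored_endangered_energy_python (queens : List (Int × Int × Int)) (out : Int × Int × Int) : Prop := out = compute_colored_endangered_energy_python_alt queens
instance (queens : List (Int × Int × Int)) (out : Int × Int × Int) : Decidable (Spec_compute_colored_endangered_energy_python queens out) := by unfold Spec_compute_colored_endangered_energy_python; infer_instance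

-- ===== CLAIM (what is proved, stated in full; the proofs are below) =====
def Claim_equal_compute_colored_endangered_energy_python : Prop := ∀ (queens : List (Int × Int × Int)), Dom_compute_colored_endangered_energy_python queens → Spec_compute_colored_endangered_energy_python queens (compute_colored_endangered_energy_python queens)

-- ===== LEMMAS AND PROOFS =====

-- B's per-queen endangerment test
def pvBCond (queens : List (Int × Int × Int)) (q : Int × Int × Int) : Bool :=
  (pvKeys q).any (fun key => decide ((pvCounts queens).getD key 0 ≥ 2))

-- KEY lemma: two queens attack each other iff they share an invariant key.
theorem pv_nodup_pvKeys (q : Int × Int × Int) : (pvKeys q).Nodup := by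
  have h : ((pvKeys q).map Prod.fst).Nodup := by
    simp [pvKeys]
  exact h.of_map

theorem pv_attack_iff (q1 q2 : Int × Int × Int) :
    check_attack_python q1 q2 = true ↔ ∃ key, key ∈ pvKeys q1 ∧ key ∈ pvKeys q2 := by
  obtain ⟨i1, j1, k1⟩ := q1
  obtain ⟨i2, j2, k2⟩ := q2
  simp only [check_attack_python, pvKeys, List.mem_cons, List.not_mem_nil, or_false]
  constructor
  · intro h
    split_ifs at h with h1 h2 h3 h4 h5
    · simp only [Bool.or_eq_true, Bool.and_eq_true, beq_iff_eq] at h1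
      rcases h1 with (h | h) | h
      · exact ⟨(0, i1, j1), by simp, by simp [h.1, h.2]⟩
      · exact ⟨(1, i1, k1), by simp, by simp [h.1, h.2]⟩
      · exact ⟨(2, j1, k1), by simp, by simp [h.1, h.2]⟩
    · simp only [Bool.and_eq_true, beq_iff_eq, bne_iff_ne, ne_eq] at h2
      rcases (by omega : i1 + j1 = i2 + j2 ∨ i1 - j1 = i2 - j2) with h | h
      · exact ⟨(3, k1, i1 + j1), by simp, by simp [h2.1.1, h]⟩
      · exact ⟨(4, k1, i1 - j1), by simp, by simp [h2.1.1, h]⟩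
    · simp only [Bool.and_eq_true, beq_iff_eq, bne_iff_ne, ne_eq] at h3
      rcases (by omega : i1 + k1 = i2 + k2 ∨ i1 - k1 = i2 - k2) with h | h
      · exact ⟨(5, j1, i1 + k1), by simp, by simp [h3.1.1, h]⟩
      · exact ⟨(6, j1, i1 - k1), by simp, by simp [h3.1.1, h]⟩
    · simp only [Bool.and_eq_true, beq_iff_eq, bne_iff_ne, ne_eq] at h4
      rcases (by omega : j1 + k1 = j2 + k2 ∨ j1 - k1 = j2 - k2) with h | h
      · exact ⟨(7, i1, j1 + k1), by simp, by simp [h4.1.1, h]⟩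
      · exact ⟨(8, i1, j1 - k1), by simp, by simp [h4.1.1, h]⟩
    · simp only [Bool.and_eq_true, beq_iff_eq, bne_iff_ne, ne_eq] at h5
      rcases (by omega :
          (j1 - i1 = j2 - i2 ∧ k1 - i1 = k2 - i2) ∨ (j1 - i1 = j2 - i2 ∧ k1 + i1 = k2 + i2) ∨
          (j1 + i1 = j2 + i2 ∧ k1 - i1 = k2 - i2) ∨ (j1 + i1 = j2 + i2 ∧ k1 + i1 = k2 + i2)) with
        h | h | h | h
      · exact ⟨(9, j1 - i1, k1 - i1), by simp, by simp [h.1, h.2]⟩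
      · exact ⟨(10, j1 - i1, k1 + i1), by simp, by simp [h.1, h.2]⟩
      · exact ⟨(11, j1 + i1, k1 - i1), by simp, by simp [h.1, h.2]⟩
      · exact ⟨(12, j1 + i1, k1 + i1), by simp, by simp [h.1, h.2]⟩
  · rintro ⟨key, hk1, hk2⟩
    split_ifs with h1 h2 h3 h4 h5
    all_goals try rfl
    exfalso
    simp only [Bool.or_eq_true, Bool.and_eq_true, beq_iff_eq, bne_iff_ne, ne_eq, not_or,
      not_and] at h1 h2 h3 h4 h5
    rcases hk1 with rfl | rfl | rfl | rfl | rfl | rfl | rfl | rfl | rfl | rfl | rfl | rfl | rfl <;>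
      (simp only [Prod.mk.injEq] at hk2; norm_num at hk2) <;> omega

theorem pv_attack_symm (q1 q2 : Int × Int × Int) :
    check_attack_python q1 q2 = check_attack_python q2 q1 := by
  rw [Bool.eq_iff_iff, pv_attack_iff, pv_attack_iff]
  exact ⟨fun ⟨k, h1, h2⟩ => ⟨k, h2, h1⟩, fun ⟨k, h1, h2⟩ => ⟨k, h2, h1⟩⟩

-- counts[key] counts the queens one of whose keys is `key`
theorem pv_count_flat (key : Nat × Int × Int) (l : List (Int × Int × Int)) :
    List.count key (l.flatMap pvKeys) = l.countP (fun q => decide (key ∈ pvKeys q)) := by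
  induction l with
  | nil => simp
  | cons q l ih =>
    rw [List.flatMap_cons, List.count_append, ih, List.countP_cons]
    by_cases h : key ∈ pvKeys q
    · rw [List.count_eq_one_of_mem (pv_nodup_pvKeys q) h]
      simp [h, Nat.add_comm]
    · rw [List.count_eq_zero_of_not_mem h]
      simp [h]

theorem pv_counts_getD (queens : List (Int × Int × Int)) (key : Nat × Int × Int) :
    (pvCounts queens).getD key 0 = (queens.countP (fun q => decide (key ∈ pvKeys q)) : Int) := by
  unfold pvCounts
  rw [← List.foldl_flatMap, PySem.Dict.getD_foldl_insert_add_one, pv_count_flat]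
  simp

theorem pv_mem_inner (queens : List (Int × Int × Int)) (i : Int) (l : List Int)
    (es : PySem.Set Int) (t : Int) :
    t ∈ l.foldl (fun es j =>
        if check_attack_python (PySem.List.pyGetD queens i (0,0,0)) (PySem.List.pyGetD queens j (0,0,0))
        then PySem.Set.add (PySem.Set.add es i) j else es) es
      ↔ t ∈ es ∨ ∃ j ∈ l,
          check_attack_python (PySem.List.pyGetD queens i (0,0,0)) (PySem.List.pyGetD queens j (0,0,0)) = true ∧
          (t = i ∨ t = j) := by
  induction l generalizing es with
  | nil => simp
  | cons j l ih =>
    simp only [List.foldl_cons]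
    rw [ih]
    by_cases h : check_attack_python (PySem.List.pyGetD queens i (0,0,0)) (PySem.List.pyGetD queens j (0,0,0)) = true
    · rw [if_pos h]
      simp only [PySem.Set.mem_add, List.mem_cons]
      constructor
      · rintro (((hs | h1) | h1) | ⟨j', hj', ha, ht⟩)
        · exact Or.inl hs
        · exact Or.inr ⟨j, Or.inl rfl, h, Or.inl h1⟩
        · exact Or.inr ⟨j, Or.inl rfl, h, Or.inr h1⟩
        · exact Or.inr ⟨j', Or.inr hj', ha, ht⟩
      · rintro (hs | ⟨j', (rfl | hj'), ha, (h1 | h1)⟩)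
        · exact Or.inl (Or.inl (Or.inl hs))
        · exact Or.inl (Or.inl (Or.inr h1))
        · exact Or.inl (Or.inr h1)
        · exact Or.inl (Or.inl (Or.inr h1))
        · exact Or.inr ⟨j', hj', ha, Or.inr h1⟩
    · rw [if_neg h]
      constructor
      · rintro (hs | ⟨j', hj', ha, ht⟩)
        · exact Or.inl hs
        · exact Or.inr ⟨j', List.mem_cons_of_mem _ hj', ha, ht⟩
      · rintro (hs | ⟨j', hj', ha, ht⟩)
        · exact Or.inl hs
        · rcases List.mem_cons.mp hj' with rfl | hj''
          · exact absurd ha h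
          · exact Or.inr ⟨j', hj'', ha, ht⟩

theorem pv_mem_outer (queens : List (Int × Int × Int)) (n : Int) (l : List Int)
    (es : PySem.Set Int) (t : Int) :
    t ∈ l.foldl (fun es i => pvInnerLoop queens n i es) es
      ↔ t ∈ es ∨ ∃ i ∈ l, ∃ j : Int, i + 1 ≤ j ∧ j < n ∧
          check_attack_python (PySem.List.pyGetD queens i (0,0,0)) (PySem.List.pyGetD queens j (0,0,0)) = true ∧
          (t = i ∨ t = j) := by
  induction l generalizing es with
  | nil => simp
  | cons i l ih =>
    simp only [List.foldl_cons]
    rw [ih]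
    unfold pvInnerLoop
    rw [pv_mem_inner]
    simp only [PySem.List.mem_pyRange_one, List.mem_cons]
    constructor
    · rintro ((hs | ⟨j, ⟨hj1, hj2⟩, ha, ht⟩) | ⟨i', hi', j, hj1, hj2, ha, ht⟩)
      · exact Or.inl hs
      · exact Or.inr ⟨i, Or.inl rfl, j, hj1, hj2, ha, ht⟩
      · exact Or.inr ⟨i', Or.inr hi', j, hj1, hj2, ha, ht⟩
    · rintro (hs | ⟨i', (rfl | hi'), j, hj1, hj2, ha, ht⟩)
      · exact Or.inl (Or.inl hs)
      · exact Or.inl (Or.inr ⟨j, ⟨hj1, hj2⟩, ha, ht⟩)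
      · exact Or.inr ⟨i', hi', j, hj1, hj2, ha, ht⟩

-- membership characterisation of A's endangered_set
theorem pv_mem_endangered (queens : List (Int × Int × Int)) (t : Int) :
    t ∈ pvEndangeredSet queens (queens.length : Int) ↔
      ∃ i j : Int, 0 ≤ i ∧ i < j ∧ j < (queens.length : Int) ∧
        check_attack_python (PySem.List.pyGetD queens i (0,0,0)) (PySem.List.pyGetD queens j (0,0,0)) = true ∧
        (t = i ∨ t = j) := by
  unfold pvEndangeredSet
  rw [pv_mem_outer]
  simp only [PySem.List.mem_pyRange_one]
  constructor
  · rintro (hs | ⟨i, ⟨hi0, hin⟩, j, hj1, hj2, ha, ht⟩)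
    · exact absurd hs (by simp [PySem.Set.empty])
    · exact ⟨i, j, hi0, by omega, hj2, ha, ht⟩
  · rintro ⟨i, j, hi0, hij, hjn, ha, ht⟩
    exact Or.inr ⟨i, ⟨hi0, by omega⟩, j, by omega, hjn, ha, ht⟩

theorem pv_nodup_inner (queens : List (Int × Int × Int)) (i : Int) (l : List Int)
    (es : PySem.Set Int) (h : es.Nodup) :
    (l.foldl (fun es j =>
        if check_attack_python (PySem.List.pyGetD queens i (0,0,0)) (PySem.List.pyGetD queens j (0,0,0))
        then PySem.Set.add (PySem.Set.add es i) j else es) es).Nodup := by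
  induction l generalizing es with
  | nil => exact h
  | cons j l ih =>
    simp only [List.foldl_cons]
    apply ih
    split_ifs
    · exact PySem.Set.nodup_add _ _ (PySem.Set.nodup_add _ _ h)
    · exact h

theorem pv_nodup_endangered (queens : List (Int × Int × Int)) :
    (pvEndangeredSet queens (queens.length : Int)).Nodup := by
  unfold pvEndangeredSet
  generalize PySem.List.pyRange 0 (queens.length : Int) 1 = l
  have : ∀ (es : PySem.Set Int), es.Nodup →
      (l.foldl (fun es i => pvInnerLoop queens (queens.length : Int) i es) es).Nodup := by
    induction l with
    | nil => exact fun es h => h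
    | cons i l ih =>
      intro es h
      simp only [List.foldl_cons]
      exact ih _ (pv_nodup_inner queens i _ es h)
  exact this _ (by simp [PySem.Set.empty])

-- two distinct positions satisfying p force countP ≥ 2, and conversely
theorem pv_countP_two {α : Type} (l : List α) (p : α → Bool) (a b : Nat)
    (ha : a < l.length) (hb : b < l.length) (hne : a ≠ b)
    (hpa : p l[a] = true) (hpb : p l[b] = true) : 2 ≤ l.countP p := by
  rcases Nat.lt_or_ge a b with h | h
  · have hdecomp : l = l.take (a+1) ++ l.drop (a+1) := (List.take_append_drop _ _).symm
    rw [hdecomp, List.countP_append]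
    have h1 : 0 < (l.take (a+1)).countP p := by
      rw [List.countP_pos_iff]
      exact ⟨l[a], by
        refine ⟨?_, hpa⟩
        have : (l.take (a+1))[a]'(by simp; omega) = l[a] := List.getElem_take
        rw [← this]; exact List.getElem_mem _⟩
    have h2 : 0 < (l.drop (a+1)).countP p := by
      rw [List.countP_pos_iff]
      refine ⟨l[b], ?_, hpb⟩
      have : (l.drop (a+1))[b - (a+1)]'(by simp; omega) = l[b] := by
        rw [List.getElem_drop]; congr 1; omega
      rw [← this]; exact List.getElem_mem _
    omega
  · have hlt : b < a := by omega
    have hdecomp : l = l.take (b+1) ++ l.drop (b+1) := (List.take_append_drop _ _).symm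
    rw [hdecomp, List.countP_append]
    have h1 : 0 < (l.take (b+1)).countP p := by
      rw [List.countP_pos_iff]
      exact ⟨l[b], by
        refine ⟨?_, hpb⟩
        have : (l.take (b+1))[b]'(by simp; omega) = l[b] := List.getElem_take
        rw [← this]; exact List.getElem_mem _⟩
    have h2 : 0 < (l.drop (b+1)).countP p := by
      rw [List.countP_pos_iff]
      refine ⟨l[a], ?_, hpa⟩
      have : (l.drop (b+1))[a - (b+1)]'(by simp; omega) = l[a] := by
        rw [List.getElem_drop]; congr 1; omega
      rw [← this]; exact List.getElem_mem _
    omega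

theorem pv_countP_two_exists {α : Type} (l : List α) (p : α → Bool) (t : Nat)
    (ht : t < l.length) (hpt : p l[t] = true) (h2 : 2 ≤ l.countP p) :
    ∃ s, ∃ hs : s < l.length, s ≠ t ∧ p (l[s]'hs) = true := by
  have hdecomp : l = l.take t ++ l[t] :: l.drop (t+1) := by
    conv_lhs => rw [← List.take_append_drop t l]
    rw [List.drop_eq_getElem_cons ht]
  have hcount : l.countP p = (l.take t).countP p + (1 + (l.drop (t+1)).countP p) := by
    conv_lhs => rw [hdecomp]
    rw [List.countP_append, List.countP_cons, hpt]
    simp; omega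
  rcases Nat.lt_or_ge 0 ((l.take t).countP p) with h | h
  · rw [List.countP_pos_iff] at h
    obtain ⟨x, hx, hpx⟩ := h
    obtain ⟨i, hi, hix⟩ := List.getElem_of_mem hx
    have hit : i < t := by
      have := hi; simp [List.length_take] at this; omega
    refine ⟨i, by omega, by omega, ?_⟩
    rw [show l[i]'(by omega) = x from by rw [← hix]; exact List.getElem_take.symm]
    exact hpx
  · have : 0 < (l.drop (t+1)).countP p := by omega
    rw [List.countP_pos_iff] at this
    obtain ⟨x, hx, hpx⟩ := this
    obtain ⟨i, hi, hix⟩ := List.getElem_of_mem hx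
    have hlen : i < l.length - (t+1) := by simpa using hi
    refine ⟨t + 1 + i, by omega, by omega, ?_⟩
    rw [show l[t+1+i]'(by omega) = x from by rw [← hix]; exact (List.getElem_drop).symm]
    exact hpx

-- the heart: for a valid index t, A's "t is endangered" ↔ B's per-queen test on queens[t]
theorem pv_pointwise (queens : List (Int × Int × Int)) (t : Int) (h0 : 0 ≤ t)
    (h1 : t < (queens.length : Int)) :
    (∃ s : Int, 0 ≤ s ∧ s < (queens.length : Int) ∧ s ≠ t ∧
        check_attack_python (PySem.List.pyGetD queens t (0,0,0)) (PySem.List.pyGetD queens s (0,0,0)) = true)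
      ↔ pvBCond queens (PySem.List.pyGetD queens t (0,0,0)) = true := by
  have hget : PySem.List.pyGetD queens t (0,0,0) = queens[t.toNat]'(by omega) :=
    PySem.List.pyGetD_eq_getElem queens (0,0,0) h0 h1
  unfold pvBCond
  rw [List.any_eq_true]
  constructor
  · rintro ⟨s, hs0, hs1, hsne, hatk⟩
    have hsget : PySem.List.pyGetD queens s (0,0,0) = queens[s.toNat]'(by omega) :=
      PySem.List.pyGetD_eq_getElem queens (0,0,0) hs0 hs1
    obtain ⟨key, hk1, hk2⟩ := (pv_attack_iff _ _).mp hatk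
    refine ⟨key, hk1, ?_⟩
    rw [decide_eq_true_eq, pv_counts_getD]
    have h2 : 2 ≤ queens.countP (fun q => decide (key ∈ pvKeys q)) := by
      apply pv_countP_two queens _ t.toNat s.toNat (by omega) (by omega) (by omega)
      · rw [decide_eq_true_eq, ← hget]; exact hk1
      · rw [decide_eq_true_eq, ← hsget]; exact hk2
    exact_mod_cast h2
  · rintro ⟨key, hkmem, hkc⟩
    rw [decide_eq_true_eq, pv_counts_getD] at hkc
    have h2 : 2 ≤ queens.countP (fun q => decide (key ∈ pvKeys q)) := by exact_mod_cast hkc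
    have hpt : (fun q => decide (key ∈ pvKeys q)) (queens[t.toNat]'(by omega)) = true := by
      rw [decide_eq_true_eq, ← hget]; exact hkmem
    obtain ⟨sn, hs, hsne, hps⟩ := pv_countP_two_exists queens _ t.toNat (by omega) hpt h2
    refine ⟨(sn : Int), by omega, by omega, by omega, ?_⟩
    apply (pv_attack_iff _ _).mpr
    refine ⟨key, hkmem, ?_⟩
    have hsget : PySem.List.pyGetD queens (sn : Int) (0,0,0) = queens[sn]'hs := by
      rw [PySem.List.pyGetD_eq_getElem queens (0,0,0) (by omega) (by omega)]
      simp
    rw [hsget]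
    simpa using hps

-- A's endangered count = countP of B's test over the queens
theorem pv_map_getD_range {α : Type} (l : List α) (d : α) :
    (List.range l.length).map (fun k => l.getD k d) = l := by
  apply List.ext_getElem (by simp)
  intro i h1 h2
  simp [List.getD_eq_getElem?_getD, List.getElem?_eq_getElem h2]

theorem pv_mem_endangered' (queens : List (Int × Int × Int)) (t : Int) :
    t ∈ pvEndangeredSet queens (queens.length : Int) ↔
      (0 ≤ t ∧ t < (queens.length : Int)) ∧ pvBCond queens (PySem.List.pyGetD queens t (0,0,0)) = true := by
  rw [pv_mem_endangered]
  constructor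
  · rintro ⟨i, j, hi0, hij, hjn, ha, (rfl | rfl)⟩
    · refine ⟨⟨hi0, by omega⟩, ?_⟩
      rw [← pv_pointwise queens t hi0 (by omega)]
      exact ⟨j, by omega, hjn, by omega, ha⟩
    · refine ⟨⟨by omega, hjn⟩, ?_⟩
      rw [← pv_pointwise queens t (by omega) hjn]
      exact ⟨i, hi0, by omega, by omega, by rw [← pv_attack_symm]; exact ha⟩
  · rintro ⟨⟨h0, h1⟩, hb⟩
    rw [← pv_pointwise queens t h0 h1] at hb
    obtain ⟨s, hs0, hs1, hsne, hatk⟩ := hb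
    rcases lt_trichotomy t s with h | h | h
    · exact ⟨t, s, h0, h, hs1, hatk, Or.inl rfl⟩
    · exact absurd h (Ne.symm hsne)
    · exact ⟨s, t, hs0, h, h1, by rw [← pv_attack_symm]; exact hatk, Or.inr rfl⟩

theorem pv_endangered_len (queens : List (Int × Int × Int)) :
    PySem.Set.len (pvEndangeredSet queens (queens.length : Int)) =
      (queens.countP (pvBCond queens) : Int) := by
  have hperm : (pvEndangeredSet queens (queens.length : Int)).Perm
      ((PySem.List.pyRange 0 (queens.length : Int) 1).filter
        (fun t => pvBCond queens (PySem.List.pyGetD queens t (0,0,0)))) := by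
    rw [List.perm_ext_iff_of_nodup (pv_nodup_endangered queens)
      ((PySem.List.nodup_pyRange_one _ _).filter _)]
    intro t
    rw [pv_mem_endangered', List.mem_filter, PySem.List.mem_pyRange_one]
  have hlen : (pvEndangeredSet queens (queens.length : Int)).length =
      queens.countP (pvBCond queens) := by
    rw [hperm.length_eq, ← List.countP_eq_length_filter]
    rw [PySem.List.pyRange_one]
    rw [List.countP_map]
    have hn : ((queens.length : Int) - 0).toNat = queens.length := by omega
    rw [hn]
    have hfun : ((fun t => pvBCond queens (PySem.List.pyGetD queens t (0,0,0))) ∘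
        (fun k : Nat => (0 : Int) + (k : Int))) =
        (fun k : Nat => pvBCond queens (queens.getD k (0,0,0))) := by
      funext k
      simp [PySem.List.pyGetD_natCast]
    rw [hfun]
    have hcp := List.countP_map (p := pvBCond queens)
      (f := fun k : Nat => queens.getD k (0,0,0)) (l := List.range queens.length)
    rw [pv_map_getD_range] at hcp
    rw [hcp]
    rfl
  unfold PySem.Set.len
  omega

-- ===== VERDICT (by name: the statement is the Claim_ definition above) =====
theorem pv_eb (queens : List (Int × Int × Int)) :
    pvEB queens = ((queens.countP (pvBCond queens) : Int), pvBlackCount queens) := by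
  unfold pvEB pvBlackCount pvBCond
  rw [PySem.List.foldl_prod_mk
        (fun e q => if (pvKeys q).any (fun key => decide ((pvCounts queens).getD key 0 ≥ 2)) then e + 1 else e)
        (fun b q => if PySem.Int.mod (q.1 + q.2.1 + q.2.2) 2 == 1 then b + 1 else b) queens 0 0,
      PySem.List.foldl_count_if]
  simp

theorem compute_colored_endangered_energy_python_spec : Claim_equal_compute_colored_endangered_energy_python := by
  intro queens _
  show _ = _
  unfold compute_colored_endangered_energy_python compute_colored_endangered_energy_python_alt
  rw [pv_eb]
  simp only [PySem.List.len_eq]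
  rw [pv_endangered_len]
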